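-- pv_equiv track=rewrite | github.com/youtube/cobalt | cobalt/build/testing/parallel_test_runner.py | chunk_tests
-- ===== SOURCE A (Python) =====
-- import collections
-- from typing import List, Set, Dict, Tuple, Optional, Deque, Union
--
-- def chunk_tests(suites_to_run: Dict[str, List[str]], batch_size_tests: int = 100) -> List[List[Tuple[str, List[str]]]]:
--     """
--     Chunks tests into batches.
--     Returns list of batches, where each batch is a list of (suite_name, tests).
--     """
--     all_flat = []
--     for suite, tests in suites_to_run.items():
--         for t in tests:
--             all_flat.append((suite, t))
--
--     batches = []
--     for i in range(0, len(all_flat), batch_size_tests):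
--         chunk = all_flat[i:i + batch_size_tests]
--         suite_map = collections.defaultdict(list)
--         for s, t in chunk:
--             suite_map[s].append(t)
--         batches.append(list(suite_map.items()))
--
--     return batches
-- ===== SOURCE B (Python) =====
-- def chunk_tests(suites_to_run, batch_size_tests=100):
--     """Single pass: group each test under its suite in the current batch,
--     flushing whenever the running counter reaches batch_size_tests."""
--     batches = []
--     batch = []
--     count = 0
--     for suite, tests in suites_to_run.items():
--         for t in tests:
--             if batch and batch[-1][0] == suite:
--                 batch[-1] = (suite, batch[-1][1] + [t])
--             else:
--                 batch.append((suite, [t]))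
--             count += 1
--             if count == batch_size_tests:
--                 batches.append(batch)
--                 batch = []
--                 count = 0
--     if batch:
--         batches.append(batch)
--     return batches
-- ===== Notes on version B (the rewrite author's own statement) =====
-- stated objective: alternative
-- what changed: Instead of flattening all tests, slicing by range() indices and re-grouping each slice through a defaultdict, B makes a single pass over the suites, appending each test to the current batch (extending the last (suite, tests) entry when the suite matches, else starting a new entry) and flushing the batch whenever a running counter reaches batch_size_tests.
-- outside the precondition, e.g. on chunk_tests({'s': ['t']}, -1): A returns [], B returns [[('s', ['t'])]]
import Mathlib
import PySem

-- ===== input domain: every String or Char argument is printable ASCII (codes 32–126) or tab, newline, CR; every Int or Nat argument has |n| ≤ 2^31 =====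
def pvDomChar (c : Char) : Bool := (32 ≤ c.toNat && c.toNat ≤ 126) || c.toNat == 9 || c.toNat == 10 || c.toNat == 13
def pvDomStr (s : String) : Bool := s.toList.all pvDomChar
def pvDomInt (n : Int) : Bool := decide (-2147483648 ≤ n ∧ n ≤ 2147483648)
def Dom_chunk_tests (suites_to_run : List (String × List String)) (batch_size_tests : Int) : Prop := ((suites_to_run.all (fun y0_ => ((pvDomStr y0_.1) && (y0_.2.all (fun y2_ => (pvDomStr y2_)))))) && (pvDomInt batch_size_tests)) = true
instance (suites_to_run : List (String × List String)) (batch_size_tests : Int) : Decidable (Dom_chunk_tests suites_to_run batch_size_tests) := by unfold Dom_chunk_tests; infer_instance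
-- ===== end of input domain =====

-- B replaces A's flatten-then-slice-then-regroup (range indices + defaultdict) by a single
-- counter-driven pass over the suites that builds each batch incrementally; alternative
-- decomposition, same asymptotic cost.


-- ===== PORT A =====
def chunk_tests (suites_to_run : List (String × List String)) (batch_size_tests : Int) : List (List (String × List String)) :=
  let all_flat : List (String × String) :=
    suites_to_run.foldl (fun acc p => p.2.foldl (fun acc2 t => acc2 ++ [(p.1, t)]) acc) []
  (PySem.List.pyRange 0 (all_flat.length : Int) batch_size_tests).foldl
    (fun batches i =>
      let chunk := PySem.List.slice all_flat (some i) (some (i + batch_size_tests))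
      let suite_map := chunk.foldl (fun d p => d.modify p.1 [] (fun v => v ++ [p.2]))
        (PySem.Dict.empty : PySem.Dict String (List String))
      batches ++ [suite_map.items]) []

-- ===== PORT B =====
-- Source B's in-loop batch update: extend the last (suite, tests) entry if the suite matches, else append a new entry
def altUpdateBatch (batch : List (String × List String)) (suite t : String) : List (String × List String) :=
  match batch.getLast? with
  | some last => if last.1 = suite then batch.dropLast ++ [(suite, last.2 ++ [t])] else batch ++ [(suite, [t])]
  | none => [(suite, [t])]

-- Source B's loop body: update the batch, bump the counter, flush when it reaches batch_size_tests
def altStep (batch_size_tests : Int)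
    (st : List (List (String × List String)) × List (String × List String) × Int)
    (suite t : String) : List (List (String × List String)) × List (String × List String) × Int :=
  let batch' := altUpdateBatch st.2.1 suite t
  if st.2.2 + 1 = batch_size_tests then (st.1 ++ [batch'], [], 0) else (st.1, batch', st.2.2 + 1)

-- Source B's trailing flush: 'if batch: batches.append(batch)'
def altFinish (st : List (List (String × List String)) × List (String × List String) × Int) :
    List (List (String × List String)) :=
  if st.2.1.isEmpty then st.1 else st.1 ++ [st.2.1]

def chunk_tests_alt (suites_to_run : List (String × List String)) (batch_size_tests : Int) : List (List (String × List String)) :=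
  altFinish (suites_to_run.foldl
    (fun st p => p.2.foldl (fun st2 t => altStep batch_size_tests st2 p.1 t) st)
    ([], [], 0))

-- ===== PRECONDITION & SPEC =====
-- Pre_ excludes batch_size_tests ≤ 0 (at 0 A raises ValueError from range(); for a negative size A's
-- empty result is an artefact of range's negative step while B collects everything into one batch — a
-- degenerate corner no caller specifies) and association lists with duplicate suite names, which do not
-- represent a Python dict (A's per-chunk dict would merge what B keeps as separate entries).
def Pre_chunk_tests (suites_to_run : List (String × List String)) (batch_size_tests : Int) : Prop :=
  0 < batch_size_tests ∧ (suites_to_run.map Prod.fst).Nodup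
instance (suites_to_run : List (String × List String)) (batch_size_tests : Int) : Decidable (Pre_chunk_tests suites_to_run batch_size_tests) := by unfold Pre_chunk_tests; infer_instance

def pvWitness_chunk_tests : (List (String × List String)) × Int :=
  ([("suite_a", ["t1", "t2", "t3"]), ("suite_b", ["t4"])], 2)

def Spec_chunk_tests (suites_to_run : List (String × List String)) (batch_size_tests : Int) (out : List (List (String × List String))) : Prop := out = chunk_tests_alt suites_to_run batch_size_tests
instance (suites_to_run : List (String × List String)) (batch_size_tests : Int) (out : List (List (String × List String))) : Decidable (Spec_chunk_tests suites_to_run batch_size_tests out) := by unfold Spec_chunk_tests; infer_instance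

-- ===== CLAIM (what is proved, stated in full; the proofs are below) =====
def Claim_equal_chunk_tests : Prop := ∀ (suites_to_run : List (String × List String)) (batch_size_tests : Int), Dom_chunk_tests suites_to_run batch_size_tests → Pre_chunk_tests suites_to_run batch_size_tests → Spec_chunk_tests suites_to_run batch_size_tests (chunk_tests suites_to_run batch_size_tests)

-- ===== LEMMAS AND PROOFS =====

-- the flat list both algorithms effectively traverse
def pvFlatten (l : List (String × List String)) : List (String × String) :=
  l.flatMap (fun p => p.2.map (fun t => (p.1, t)))

-- adjacency grouping of a flat chunk (what B's batch construction computes)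
def grpAux (s : String) (acc : List String) : List (String × String) → List (String × List String)
  | [] => [(s, acc)]
  | p :: rest => if p.1 = s then grpAux s (acc ++ [p.2]) rest else (s, acc) :: grpAux p.1 [p.2] rest

def grp : List (String × String) → List (String × List String)
  | [] => []
  | p :: rest => grpAux p.1 [p.2] rest

-- chunks of size n (intended 0 < n)
def chunksN (n : Nat) : List (String × String) → List (List (String × String))
  | [] => []
  | x :: r => (x :: r.take (n - 1)) :: chunksN n (r.drop (n - 1))
  termination_by xs => xs.length
  decreasing_by simp [List.length_drop]

-- a flat list that is a concatenation of nonempty single-suite runs with pairwise-new suites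
inductive Grouped : List (String × String) → Prop
  | nil : Grouped []
  | cons (s : String) (ts : List String) (rest : List (String × String)) :
      ts ≠ [] → Grouped rest → s ∉ rest.map Prod.fst →
      Grouped (ts.map (fun t => (s, t)) ++ rest)

-- A's defaultdict grouping of one chunk, as items of a key-indexed map
def aGroup (c : List (String × String)) : List (String × List String) :=
  (PySem.Set.ofList (c.map Prod.fst)).map
    (fun k => (k, (c.filter (fun p => p.1 == k)).map Prod.snd))

theorem L1_flat (l : List (String × List String)) :
    l.foldl (fun acc p => p.2.foldl (fun acc2 t => acc2 ++ [(p.1, t)]) acc) [] = pvFlatten l := by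
  rw [PySem.List.foldl_congr_mem l _ (fun acc p => acc ++ p.2.map (fun t => (p.1, t))) []
    (fun acc p _ => PySem.List.foldl_append_singleton_eq_map _ _ _)]
  rw [PySem.List.foldl_append_eq_flatMap, List.nil_append]
  rfl

theorem L3_items (c : List (String × String)) :
    (c.foldl (fun d p => d.modify p.1 [] (fun v => v ++ [p.2]))
      (PySem.Dict.empty : PySem.Dict String (List String))).items = aGroup c := by
  have hkeys : (c.foldl (fun d p => d.modify p.1 [] (fun v => v ++ [p.2]))
      (PySem.Dict.empty : PySem.Dict String (List String))).keys
      = PySem.Set.ofList (c.map Prod.fst) :=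
    (PySem.Dict.keys_foldl_modify_key c Prod.fst ([] : List String)
      (fun _ p => fun v => v ++ [p.2]) PySem.Dict.empty).trans (PySem.Set.update_nil_left _)
  have hnd : (c.foldl (fun d p => d.modify p.1 [] (fun v => v ++ [p.2]))
      (PySem.Dict.empty : PySem.Dict String (List String))).keys.Nodup :=
    PySem.Dict.nodup_keys_foldl_modify_key c Prod.fst ([] : List String)
      (fun _ p => fun v => v ++ [p.2]) PySem.Dict.empty (by simp)
  rw [PySem.Dict.items_eq_map_keys _ hnd [], hkeys]
  unfold aGroup
  apply List.map_congr_left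
  intro k _
  have h := PySem.Dict.getD_foldl_modify_append c PySem.Dict.empty k
  simp only [PySem.Dict.getD_empty, List.nil_append] at h
  rw [h]

theorem chunksN_eq_range (n : Nat) (hn : 0 < n) : ∀ xs : List (String × String),
    (List.range ((xs.length + n - 1) / n)).map (fun k => (xs.drop (n * k)).take n) = chunksN n xs := by
  intro xs
  induction xs using chunksN.induct n with
  | case1 =>
    simp [chunksN]
    omega
  | case2 x r ih =>
    have hcount : ((x :: r).length + n - 1) / n = ((r.drop (n - 1)).length + n - 1) / n + 1 := by
      rw [List.length_drop, List.length_cons]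
      by_cases hc : r.length + 1 ≤ n
      · rw [Nat.div_eq_of_lt_le (k := 1) (by omega) (by omega),
          show r.length - (n - 1) = 0 by omega, Nat.div_eq_of_lt (by omega)]
      · rw [show r.length + 1 + n - 1 = r.length + n by omega, Nat.add_div_right _ hn,
          show r.length - (n - 1) + n - 1 = r.length by omega]
    rw [hcount, List.range_succ_eq_map, List.map_cons]
    rw [show chunksN n (x :: r) = (x :: r.take (n - 1)) :: chunksN n (r.drop (n - 1)) from by
      rw [chunksN]]
    congr 1
    · rw [Nat.mul_zero, List.drop_zero]
      cases n with
      | zero => omega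
      | succ m => simp [List.take_succ_cons]
    · rw [← ih, List.map_map]
      apply List.map_congr_left
      intro k _
      simp only [Function.comp_apply]
      rw [List.drop_drop]
      rw [show n * (Nat.succ k) = (n - 1 + n * k) + 1 from by rw [Nat.mul_succ]; omega,
        List.drop_succ_cons]

theorem L4_chunks (bs : Int) (hbs : 0 < bs) (xs : List (String × String)) :
    (PySem.List.pyRange 0 (xs.length : Int) bs).map
      (fun i => PySem.List.slice xs (some i) (some (i + bs))) = chunksN bs.toNat xs := by
  obtain ⟨n, rfl⟩ : ∃ n : Nat, bs = (n : Int) := ⟨bs.toNat, by omega⟩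
  have hpos : 0 < n := by omega
  rw [PySem.List.pyRange_of_pos _ _ hbs, Int.toNat_natCast]
  have hcount : (if (0:Int) < (xs.length : Int) then (((xs.length : Int) - 0 + (n:Int) - 1) / (n:Int)).toNat else 0)
      = (xs.length + n - 1) / n := by
    rcases Nat.eq_zero_or_pos xs.length with hl | hl
    · rw [hl, if_neg (by norm_num), Nat.div_eq_of_lt (by omega)]
    · rw [if_pos (by exact_mod_cast hl),
        show ((xs.length : Int) - 0 + (n : Int) - 1) = ((xs.length + n - 1 : Nat) : Int) from by omega,
        ← Int.natCast_ediv, Int.toNat_natCast]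
  rw [hcount, ← chunksN_eq_range n hpos xs, List.map_map]
  apply List.map_congr_left
  intro k _
  simp only [Function.comp_apply]
  rw [show ((0:Int) + (n:Int) * (k:Int)) = ((n * k : Nat) : Int) from by push_cast; ring,
    show (((n * k : Nat) : Int) + (n:Int)) = ((n * k + n : Nat) : Int) from by push_cast; ring,
    PySem.List.slice_natCast,
    show n * k + n - n * k = n from by omega]


theorem L5_fold (bs : Int) (l : List (String × List String)) (init : List (List (String × List String)) × List (String × List String) × Int) :
    l.foldl (fun st p => p.2.foldl (fun st2 t => altStep bs st2 p.1 t) st) init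
      = (pvFlatten l).foldl (fun st q => altStep bs st q.1 q.2) init := by
  induction l generalizing init with
  | nil => rfl
  | cons p rest ih =>
    simp only [List.foldl_cons, pvFlatten, List.flatMap_cons, List.foldl_append, List.foldl_map]
    exact ih _

theorem grpAux_ne_nil (rest : List (String × String)) : ∀ (s : String) (acc : List String),
    grpAux s acc rest ≠ [] := by
  induction rest with
  | nil => intro s acc; simp [grpAux]
  | cons p r ih =>
    intro s acc
    by_cases hp : p.1 = s
    · simpa [grpAux, hp] using ih s (acc ++ [p.2])
    · simp [grpAux, hp]

theorem grp_ne_nil (p : List (String × String)) (hp : p ≠ []) : grp p ≠ [] := by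
  cases p with
  | nil => exact absurd rfl hp
  | cons q r => exact grpAux_ne_nil r q.1 [q.2]

theorem grpRunAux (ts' : List String) (s : String) (rest : List (String × String))
    (hs : s ∉ rest.map Prod.fst) : ∀ (acc : List String),
    grpAux s acc (ts'.map (fun t => (s, t)) ++ rest) = (s, acc ++ ts') :: grp rest := by
  induction ts' with
  | nil =>
    intro acc
    cases rest with
    | nil => simp [grpAux, grp]
    | cons h r =>
      have hh : h.1 ≠ s := by
        intro he; exact hs (by rw [List.map_cons, he]; simp)
      simp [grpAux, hh, grp]
  | cons t ts' ih =>
    intro acc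
    rw [List.map_cons, List.cons_append,
      show grpAux s acc ((s, t) :: (ts'.map (fun u => (s, u)) ++ rest))
        = grpAux s (acc ++ [t]) (ts'.map (fun u => (s, u)) ++ rest) from by simp [grpAux]]
    rw [ih (acc ++ [t])]
    simp

theorem L7_grp_run (s : String) (ts : List String) (rest : List (String × String))
    (hts : ts ≠ []) (hs : s ∉ rest.map Prod.fst) :
    grp (ts.map (fun t => (s, t)) ++ rest) = (s, ts) :: grp rest := by
  cases ts with
  | nil => exact absurd rfl hts
  | cons t ts' =>
    rw [List.map_cons, List.cons_append,
      show grp ((s, t) :: (ts'.map (fun u => (s, u)) ++ rest))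
        = grpAux s [t] (ts'.map (fun u => (s, u)) ++ rest) from rfl]
    rw [grpRunAux ts' s rest hs [t]]
    simp

theorem setOfList_run (s : String) (ts : List String) (hts : ts ≠ []) (ys : List String)
    (hs : s ∉ ys) :
    PySem.Set.ofList (ts.map (fun _ => s) ++ ys) = s :: PySem.Set.ofList ys := by
  have hrun : PySem.Set.ofList (ts.map (fun _ => s)) = [s] := by
    cases ts with
    | nil => exact absurd rfl hts
    | cons t ts' =>
      rw [List.map_cons, PySem.Set.ofList_cons]
      have hd : PySem.Set.discard (PySem.Set.ofList (ts'.map (fun _ => s))) s = [] := by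
        rw [List.eq_nil_iff_forall_not_mem]
        intro y hy
        have h1 := (PySem.Set.mem_discard _ _ _).mp hy
        have h2 := (PySem.Set.mem_ofList _ _).mp h1.1
        obtain ⟨_, _, rfl⟩ := List.mem_map.mp h2
        exact h1.2 rfl
      rw [hd]
  have hfil : (PySem.Set.ofList ys).filter (fun y => !(PySem.Set.contains [s] y))
      = PySem.Set.ofList ys := by
    apply List.filter_eq_self.mpr
    intro y hy
    have hys : y ∈ ys := (PySem.Set.mem_ofList _ _).mp hy
    have hne : y ≠ s := fun he => hs (he ▸ hys)
    simp [PySem.Set.contains_eq_listContains, hne]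
  rw [PySem.Set.ofList_append, hrun, PySem.Set.update_eq_append_filter, hfil]
  rfl

theorem L8_aGroup_eq_grp (c : List (String × String)) (h : Grouped c) : aGroup c = grp c := by
  induction h with
  | nil => rfl
  | cons s ts rest hts hg hns ih =>
    rw [L7_grp_run s ts rest hts hns]
    unfold aGroup
    have hkeys : ((ts.map (fun t => (s, t)) ++ rest).map Prod.fst)
        = ts.map (fun _ => s) ++ rest.map Prod.fst := by
      simp [List.map_map, Function.comp_def]
    rw [hkeys, setOfList_run s ts hts _ hns, List.map_cons]
    have hfilterrun : (ts.map (fun t => (s, t))).filter (fun p => p.1 == s)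
        = ts.map (fun t => (s, t)) := by
      apply List.filter_eq_self.mpr
      intro p hp
      obtain ⟨t, _, rfl⟩ := List.mem_map.mp hp
      simp
    have hfilterrest : rest.filter (fun p => p.1 == s) = [] := by
      apply List.filter_eq_nil_iff.mpr
      intro p hp
      simp only [beq_iff_eq]
      intro he
      exact hns (List.mem_map.mpr ⟨p, hp, he⟩)
    congr 1
    · rw [List.filter_append, hfilterrun, hfilterrest, List.append_nil]
      simp [List.map_map, Function.comp_def]
    · rw [← ih]
      unfold aGroup
      apply List.map_congr_left
      intro k hk
      have hk' : k ∈ rest.map Prod.fst := (PySem.Set.mem_ofList _ _).mp hk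
      have hks : k ≠ s := fun he => hns (he ▸ hk')
      have hrunk : (ts.map (fun t => (s, t))).filter (fun p => p.1 == k) = [] := by
        apply List.filter_eq_nil_iff.mpr
        intro p hp
        obtain ⟨t, _, rfl⟩ := List.mem_map.mp hp
        simpa using fun he => hks he.symm
      rw [List.filter_append, hrunk, List.nil_append]

theorem L9_grouped_flat (l : List (String × List String)) (h : (l.map Prod.fst).Nodup) :
    Grouped (pvFlatten l) := by
  induction l with
  | nil => exact Grouped.nil
  | cons p rest ih =>
    rw [List.map_cons] at h
    have hnd := List.nodup_cons.mp h
    show Grouped (pvFlatten (p :: rest))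
    rw [show pvFlatten (p :: rest) = p.2.map (fun t => (p.1, t)) ++ pvFlatten rest from rfl]
    by_cases hp2 : p.2 = []
    · simpa [hp2] using ih hnd.2
    · refine Grouped.cons p.1 p.2 _ hp2 (ih hnd.2) ?_
      intro hmem
      apply hnd.1
      obtain ⟨q, hq, hfst⟩ := List.mem_map.mp hmem
      obtain ⟨r, hr, hq2⟩ := List.mem_flatMap.mp hq
      obtain ⟨t, _, rfl⟩ := List.mem_map.mp hq2
      exact List.mem_map.mpr ⟨r, hr, by simpa using hfst⟩

theorem grouped_take {xs : List (String × String)} (h : Grouped xs) :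
    ∀ m, Grouped (xs.take m) := by
  induction h with
  | nil => intro m; rw [List.take_nil]; exact Grouped.nil
  | cons s ts rest hts hg hns ih =>
    intro m
    rcases Nat.eq_zero_or_pos m with hm | hm
    · subst hm; rw [List.take_zero]; exact Grouped.nil
    · rw [List.take_append, ← List.map_take]
      have hts' : ts.take m ≠ [] := by
        cases ts with
        | nil => exact absurd rfl hts
        | cons a b => cases m with | zero => omega | succ k => simp
      refine Grouped.cons s (ts.take m) _ hts' (ih _) ?_
      intro hmem
      apply hns
      rw [List.map_take] at hmem
      exact List.mem_of_mem_take hmem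

theorem grouped_drop {xs : List (String × String)} (h : Grouped xs) :
    ∀ m, Grouped (xs.drop m) := by
  induction h with
  | nil => intro m; rw [List.drop_nil]; exact Grouped.nil
  | cons s ts rest hts hg hns ih =>
    intro m
    rw [List.drop_append]
    by_cases hd : ts.length ≤ m
    · have h0 : List.drop m (ts.map (fun t => (s, t))) = [] :=
        List.drop_eq_nil_of_le (by simpa)
      rw [h0, List.nil_append]
      exact ih _
    · rw [Nat.not_le] at hd
      have h0 : m - (ts.map (fun t => (s, t))).length = 0 := by simp; omega
      rw [h0, List.drop_zero, ← List.map_drop]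
      refine Grouped.cons s (ts.drop m) rest ?_ hg hns
      intro he
      have := List.drop_eq_nil_iff.mp he
      omega

theorem L10_grouped_chunks (n : Nat) (xs : List (String × String)) (h : Grouped xs) :
    ∀ c ∈ chunksN n xs, Grouped c := by
  induction xs using chunksN.induct n with
  | case1 => intro c hc; simp [chunksN] at hc
  | case2 x r ih =>
    intro c hc
    rw [show chunksN n (x :: r) = (x :: r.take (n - 1)) :: chunksN n (r.drop (n - 1)) from by
      rw [chunksN]] at hc
    rcases List.mem_cons.mp hc with hc1 | hc2
    · subst hc1
      rw [show (x :: r.take (n - 1)) = (x :: r).take ((n - 1) + 1) from (List.take_succ_cons).symm]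
      exact grouped_take h _
    · exact ih (by
        rw [show r.drop (n - 1) = (x :: r).drop ((n - 1) + 1) from (List.drop_succ_cons).symm]
        exact grouped_drop h _) c hc2

theorem altUpdateBatch_cons (x : String × List String) (L : List (String × List String))
    (hL : L ≠ []) (s t : String) :
    altUpdateBatch (x :: L) s t = x :: altUpdateBatch L s t := by
  unfold altUpdateBatch
  rw [List.getLast?_cons]
  cases hg : L.getLast? with
  | none => exact absurd (List.getLast?_eq_none_iff.mp hg) hL
  | some last =>
    simp only [Option.getD_some]
    by_cases he : last.1 = s
    · simp [he, List.dropLast_cons_of_ne_nil hL]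
    · simp [he]

theorem updAux (rest : List (String × String)) : ∀ (s0 : String) (acc : List String) (s t : String),
    altUpdateBatch (grpAux s0 acc rest) s t = grpAux s0 acc (rest ++ [(s, t)]) := by
  induction rest with
  | nil =>
    intro s0 acc s t
    by_cases he : s0 = s
    · simp [grpAux, altUpdateBatch, he]
    · simp [grpAux, altUpdateBatch, he, Ne.symm he]
  | cons p r ih =>
    intro s0 acc s t
    by_cases hp : p.1 = s0
    · simp only [grpAux, List.cons_append, if_pos hp]
      exact ih s0 (acc ++ [p.2]) s t
    · simp only [grpAux, List.cons_append, if_neg hp]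
      rw [altUpdateBatch_cons _ _ (grpAux_ne_nil r p.1 [p.2]) s t, ih p.1 [p.2] s t]

theorem L12_update (p : List (String × String)) (s t : String) :
    altUpdateBatch (grp p) s t = grp (p ++ [(s, t)]) := by
  cases p with
  | nil => simp [grp, grpAux, altUpdateBatch]
  | cons q r => exact updAux r q.1 [q.2] s t

theorem chunksN_cons_full (c ys : List (String × String)) (n : Nat) (hlen : c.length = n)
    (hn : 0 < n) : chunksN n (c ++ ys) = c :: chunksN n ys := by
  cases c with
  | nil => simp at hlen; omega
  | cons x r =>
    rw [List.cons_append,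
      show chunksN n ((x :: (r ++ ys))) = (x :: (r ++ ys).take (n - 1)) :: chunksN n ((r ++ ys).drop (n - 1)) from by rw [chunksN]]
    have hr : r.length = n - 1 := by simp at hlen; omega
    have h1 : (r ++ ys).take (n - 1) = r := by rw [← hr]; exact List.take_left
    have h2 : (r ++ ys).drop (n - 1) = ys := by rw [← hr]; exact List.drop_left
    rw [h1, h2]

theorem L11_invariant (bs : Int) (hbs : 0 < bs) (xs : List (String × String)) :
    ∀ (batches : List (List (String × List String))) (p : List (String × String)),
      (p.length : Int) < bs →
      altFinish (xs.foldl (fun st q => altStep bs st q.1 q.2) (batches, grp p, (p.length : Int)))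
        = batches ++ (chunksN bs.toNat (p ++ xs)).map grp := by
  induction xs with
  | nil =>
    intro batches p hp
    rw [List.foldl_nil, List.append_nil]
    by_cases hpnil : p = []
    · subst hpnil
      simp [altFinish, grp, chunksN]
    · have hne := grp_ne_nil p hpnil
      rw [altFinish, if_neg (by simpa using hne)]
      obtain ⟨x, r, rfl⟩ : ∃ x r, p = x :: r := by
        cases p with
        | nil => exact absurd rfl hpnil
        | cons a b => exact ⟨a, b, rfl⟩
      rw [show chunksN bs.toNat (x :: r) = (x :: r.take (bs.toNat - 1)) :: chunksN bs.toNat (r.drop (bs.toNat - 1)) from by rw [chunksN]]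
      have hlen : r.length ≤ bs.toNat - 1 := by
        simp only [List.length_cons] at hp
        omega
      rw [List.take_of_length_le hlen, List.drop_eq_nil_of_le hlen,
        show chunksN bs.toNat ([] : List (String × String)) = [] from by rw [chunksN]]
      simp
  | cons q xs' ih =>
    intro batches p hp
    rw [List.foldl_cons]
    have hstep : altStep bs (batches, grp p, (p.length : Int)) q.1 q.2
        = if (p.length : Int) + 1 = bs then (batches ++ [grp (p ++ [q])], [], 0)
          else (batches, grp (p ++ [q]), (p.length : Int) + 1) := by
      simp only [altStep, L12_update]
    rw [hstep]
    by_cases hfull : (p.length : Int) + 1 = bs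
    · rw [if_pos hfull]
      have h2 := ih (batches ++ [grp (p ++ [q])]) [] (by simpa using hbs)
      rw [show grp ([] : List (String × String)) = [] from rfl] at h2
      simp only [List.length_nil, Nat.cast_zero, List.nil_append] at h2
      rw [h2, show p ++ q :: xs' = (p ++ [q]) ++ xs' from by simp,
        chunksN_cons_full (p ++ [q]) xs' bs.toNat (by simp; omega) (by omega)]
      simp
    · rw [if_neg hfull]
      have hlt : ((p ++ [q]).length : Int) < bs := by simp; omega
      have h2 := ih batches (p ++ [q]) hlt
      rw [show (((p ++ [q]).length : Nat) : Int) = (p.length : Int) + 1 from by simp] at h2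
      rw [h2, show (p ++ [q]) ++ xs' = p ++ q :: xs' from by simp]


-- ===== VERDICT (by name: the statement is the Claim_ definition above) =====
theorem chunk_tests_spec : Claim_equal_chunk_tests := by
  intro l bs _ hpre
  obtain ⟨hbs, hnd⟩ := hpre
  unfold Spec_chunk_tests
  have hB : chunk_tests_alt l bs = (chunksN bs.toNat (pvFlatten l)).map grp := by
    unfold chunk_tests_alt
    rw [L5_fold]
    have h := L11_invariant bs hbs (pvFlatten l) [] [] (by simpa using hbs)
    simpa [grp] using h
  have hA : chunk_tests l bs = (chunksN bs.toNat (pvFlatten l)).map grp := by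
    unfold chunk_tests
    simp only [L1_flat]
    rw [PySem.List.foldl_append_singleton_eq_map, List.nil_append]
    have h4 := congrArg (List.map (fun c => (List.foldl (fun d p => d.modify p.1 [] fun v => v ++ [p.2]) (PySem.Dict.empty : PySem.Dict String (List String)) c).items)) (L4_chunks bs hbs (pvFlatten l))
    rw [List.map_map] at h4
    simp only [Function.comp_def] at h4
    rw [h4]
    apply List.map_congr_left
    intro c hc
    rw [L3_items]
    exact L8_aGroup_eq_grp c (L10_grouped_chunks _ _ (L9_grouped_flat l hnd) c hc)
  rw [hA, hB]
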